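-- pv_equiv track=rewrite | github.com/emherraiz/Examen_Ordinario_EDA2_Enrique_Marina_Herr-iz | usar_la_fuerza.py | usar_la_fuerza
-- ===== SOURCE A (Python) =====
-- def usar_la_fuerza(mochila, objetos_sacados = 0):
--     # Caso base: si la mochila está vacía, se retorna una tupla con la información de si se encontró un sable de luz y cuántos objetos se sacaron
--     if not mochila:
--         return (False, objetos_sacados)
--     # Caso recursivo: se saca el último objeto agregado a la mochila y se llama recursivamente a la función con la mochila actualizada
--     objeto = mochila.pop()
--     if objeto == "sable de luz":
--         return (True, objetos_sacados + 1)
--     else: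
--         return usar_la_fuerza(mochila, objetos_sacados + 1)
-- ===== SOURCE B (Python) =====
-- def usar_la_fuerza(mochila, objetos_sacados = 0):
--     # Iterative version: pop from the end until the light saber shows up.
--     # Like A, this empties (part of) the caller's list in place.
--     sacados = objetos_sacados
--     while mochila:
--         objeto = mochila.pop()
--         sacados += 1
--         if objeto == "sable de luz":
--             return (True, sacados)
--     return (False, sacados)
-- ===== Notes on version B (the rewrite author's own statement) =====
-- stated objective: idiomatic
-- what changed: Replaced the tail recursion (one Python call frame per popped item, hitting the recursion limit on ~1000 items) with a plain while-loop over the same pops and counter.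
import Mathlib
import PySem

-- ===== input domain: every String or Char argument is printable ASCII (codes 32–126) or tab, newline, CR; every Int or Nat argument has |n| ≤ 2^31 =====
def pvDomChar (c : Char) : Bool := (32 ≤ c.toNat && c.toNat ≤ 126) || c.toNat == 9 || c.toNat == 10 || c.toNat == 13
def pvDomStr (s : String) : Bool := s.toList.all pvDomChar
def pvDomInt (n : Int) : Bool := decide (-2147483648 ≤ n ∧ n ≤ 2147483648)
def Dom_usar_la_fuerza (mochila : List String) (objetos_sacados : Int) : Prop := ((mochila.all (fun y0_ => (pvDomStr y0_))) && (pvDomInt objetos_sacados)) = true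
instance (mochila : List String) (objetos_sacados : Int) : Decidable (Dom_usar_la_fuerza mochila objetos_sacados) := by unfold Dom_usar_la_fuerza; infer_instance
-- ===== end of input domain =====

-- B replaces A's tail recursion by a plain while-loop over the same pops; ports agree on the RETURN value (both Pythons consume the list in place).


-- ===== PORT A =====
-- A recurses: if empty return (False, k); pop the last element; if it is the saber return (True, k+1); else recurse.
def usar_la_fuerza (mochila : List String) (objetos_sacados : Int) : Bool × Int :=
  if mochila = [] then (false, objetos_sacados)
  else
    let objeto := mochila.getLast!
    if objeto = "sable de luz" then (true, objetos_sacados + 1)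
    else usar_la_fuerza mochila.dropLast (objetos_sacados + 1)
termination_by mochila.length
decreasing_by
  simp only [List.length_dropLast]
  have : mochila.length ≠ 0 := by simpa [List.length_eq_zero_iff] using (by assumption : ¬ mochila = [])
  omega

-- ===== PORT B =====
-- B's while-loop pops from the end: iterate over the reversed list with a counter.
def usar_la_fuerza_alt_loop (rest : List String) (sacados : Int) : Bool × Int :=
  match rest with
  | [] => (false, sacados)
  | objeto :: more =>
    if objeto = "sable de luz" then (true, sacados + 1)
    else usar_la_fuerza_alt_loop more (sacados + 1)

def usar_la_fuerza_alt (mochila : List String) (objetos_sacados : Int) : Bool × Int :=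
  usar_la_fuerza_alt_loop mochila.reverse objetos_sacados

-- ===== PRECONDITION & SPEC =====
def Spec_usar_la_fuerza (mochila : List String) (objetos_sacados : Int) (out : Bool × Int) : Prop := out = usar_la_fuerza_alt mochila objetos_sacados
instance (mochila : List String) (objetos_sacados : Int) (out : Bool × Int) : Decidable (Spec_usar_la_fuerza mochila objetos_sacados out) := by unfold Spec_usar_la_fuerza; infer_instance

-- ===== CLAIM (what is proved, stated in full; the proofs are below) =====
def Claim_equal_usar_la_fuerza : Prop := ∀ (mochila : List String) (objetos_sacados : Int), Dom_usar_la_fuerza mochila objetos_sacados → Spec_usar_la_fuerza mochila objetos_sacados (usar_la_fuerza mochila objetos_sacados)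

-- ===== LEMMAS AND PROOFS =====

theorem getLast!_concat_str (ys : List String) (x : String) : (ys ++ [x]).getLast! = x := by
  cases ys with
  | nil => simp [List.getLast!]
  | cons a as => simp [List.getLast!, List.getLast_append]

theorem usar_la_fuerza_eq_loop (mochila : List String) (k : Int) :
    usar_la_fuerza mochila k = usar_la_fuerza_alt_loop mochila.reverse k := by
  induction mochila using List.reverseRecOn generalizing k with
  | nil => simp [usar_la_fuerza, usar_la_fuerza_alt_loop]
  | append_singleton ys x ih =>
    rw [usar_la_fuerza]
    simp only [List.reverse_append, List.reverse_singleton, List.singleton_append,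
      usar_la_fuerza_alt_loop]
    have hne : ys ++ [x] ≠ [] := by simp
    rw [if_neg hne]
    rw [getLast!_concat_str, List.dropLast_concat]
    split_ifs with h
    · rfl
    · exact ih _

-- ===== VERDICT (by name: the statement is the Claim_ definition above) =====
theorem usar_la_fuerza_spec : Claim_equal_usar_la_fuerza := by
  intro mochila k _
  unfold Spec_usar_la_fuerza usar_la_fuerza_alt
  exact usar_la_fuerza_eq_loop mochila k
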